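-- pv_equiv track=rewrite | github.com/jnbjarni/HR_forritun | Midterm_2/Problem_3/problem3.py | make_sublist
-- ===== SOURCE A (Python) =====
-- def make_sublist(listi):
--     myList = []
--     while len(listi) != 0:
--         lenOfList = len(listi)
--         for i, items in enumerate(listi):
--             if not listi[0:i] in myList:
--                 myList.append(listi[0:i])
--
--             if i + 1 == lenOfList:
--                 myList.append(listi[0:i+1])
--                 listi.pop(0)
--     return myList
-- ===== SOURCE B (Python) =====
-- def make_sublist(listi):
--     n = len(listi)
--     out = []
--     seen = set()
--     for start in range(n):
--         for end in range(start, n):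
--             seg = listi[start:end]
--             key = tuple(seg)
--             if key not in seen:
--                 seen.add(key)
--                 out.append(seg)
--         suffix = listi[start:n]
--         out.append(suffix)
--         seen.add(tuple(suffix))
--     return out
-- ===== Notes on version B (the rewrite author's own statement) =====
-- stated objective: faster
-- what changed: Replaces the destructive while/pop loop whose dedup re-scans the whole output list with two plain index loops over slices of the untouched input, deduplicating via a hash set of tuples; B does not empty the argument list (A does) - equivalence is about the return value only.
import Mathlib
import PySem

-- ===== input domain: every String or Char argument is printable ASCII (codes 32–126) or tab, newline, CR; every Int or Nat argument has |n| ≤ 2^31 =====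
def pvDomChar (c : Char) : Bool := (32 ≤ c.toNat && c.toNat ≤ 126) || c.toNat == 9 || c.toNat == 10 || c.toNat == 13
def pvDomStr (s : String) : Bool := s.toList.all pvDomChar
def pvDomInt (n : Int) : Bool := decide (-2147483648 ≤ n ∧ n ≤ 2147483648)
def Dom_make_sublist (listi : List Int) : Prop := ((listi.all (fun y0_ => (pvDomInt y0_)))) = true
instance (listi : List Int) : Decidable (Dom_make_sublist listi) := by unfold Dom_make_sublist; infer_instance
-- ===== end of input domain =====

-- B replaces A's destructive while/pop loop (dedup by scanning the output list) with two
-- index loops over slices and a hash-set dedup; A empties its argument, B does not: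
-- the equivalence proved here is about the RETURN value only.

-- ===== PORT A =====
-- one round of A's while loop: the 'for i, items in enumerate(listi)' body
-- (listi is only mutated by pop(0) at i+1 == lenOfList, the last iteration, so the
--  inner loop reads the unmutated list throughout)
def pvInnerA (listi : List Int) (lenOfList : Int) (myList : List (List Int)) : List (List Int) :=
  (PySem.List.pyRange 0 lenOfList 1).foldl (fun acc i =>
    let acc1 := if PySem.List.slice listi (some 0) (some i) ∈ acc then acc
                else acc ++ [PySem.List.slice listi (some 0) (some i)]
    if i + 1 = lenOfList then acc1 ++ [PySem.List.slice listi (some 0) (some (i + 1))]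
    else acc1) myList

-- the while loop: each round pops the head, so recurse on the tail
def pvLoopA : List (List Int) → List Int → List (List Int)
  | myList, [] => myList
  | myList, x :: rest => pvLoopA (pvInnerA (x :: rest) ((x :: rest).length : Int) myList) rest

def make_sublist (listi : List Int) : List (List Int) :=
  pvLoopA [] listi

-- ===== PORT B =====
-- B's outer-loop body: the inner 'for end in range(start, n)' dedup loop, then the
-- unconditional append of listi[start:n]
def pvStepB (listi : List Int) (n : Int)
    (st : List (List Int) × PySem.Set (List Int)) (start : Int) :
    List (List Int) × PySem.Set (List Int) :=
  let st2 := (PySem.List.pyRange start n 1).foldl (fun st e =>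
      let seg := PySem.List.slice listi (some start) (some e)
      if seg ∈ st.2 then st
      else (st.1 ++ [seg], PySem.Set.add st.2 seg)) st
  let suffix := PySem.List.slice listi (some start) (some n)
  (st2.1 ++ [suffix], PySem.Set.add st2.2 suffix)

def make_sublist_alt (listi : List Int) : List (List Int) :=
  let n : Int := listi.length
  ((PySem.List.pyRange 0 n 1).foldl (pvStepB listi n) ([], PySem.Set.empty)).1

-- ===== PRECONDITION & SPEC =====
def Spec_make_sublist (listi : List Int) (out : List (List Int)) : Prop := out = make_sublist_alt listi
instance (listi : List Int) (out : List (List Int)) : Decidable (Spec_make_sublist listi out) := by unfold Spec_make_sublist; infer_instance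

-- ===== CLAIM (what is proved, stated in full; the proofs are below) =====
def Claim_equal_make_sublist : Prop := ∀ (listi : List Int), Dom_make_sublist listi → Spec_make_sublist listi (make_sublist listi)

-- ===== LEMMAS AND PROOFS =====

-- the clean dedup fold both inner loops reduce to
def pvDedup (suffix : List Int) (acc : List (List Int)) (i : Int) : List (List Int) :=
  if suffix.take i.toNat ∈ acc then acc else acc ++ [suffix.take i.toNat]

lemma pv_range_congr (a b a' b' : Int) (h1 : a = a') (h2 : b = b') :
    PySem.List.pyRange a b 1 = PySem.List.pyRange a' b' 1 := by rw [h1, h2]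

-- abbreviation for B's inner-loop body (as a plain function, for stating lemmas)
def pvF (orig : List Int) (s : Int)
    (st : List (List Int) × PySem.Set (List Int)) (e : Int) :
    List (List Int) × PySem.Set (List Int) :=
  let seg := PySem.List.slice orig (some s) (some e)
  if seg ∈ st.2 then st else (st.1 ++ [seg], PySem.Set.add st.2 seg)

-- B's inner dedup fold over range(s+j, s+j+d) equals the clean dedup fold over
-- range(j, j+d) on the suffix, and the invariant "seen has exactly out's members"
-- is preserved.
lemma pv_dedup_shift (orig : List Int) (s : Nat) :
    ∀ (d j : Nat) (out : List (List Int)) (seen : PySem.Set (List Int)),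
    (∀ x, x ∈ seen ↔ x ∈ out) →
    (((PySem.List.pyRange ((s : Int) + j) ((s : Int) + j + d) 1).foldl
        (pvF orig (s : Int)) (out, seen)).1
      = (PySem.List.pyRange (j : Int) ((j : Int) + d) 1).foldl (pvDedup (orig.drop s)) out)
    ∧ (∀ x, x ∈ ((PySem.List.pyRange ((s : Int) + j) ((s : Int) + j + d) 1).foldl
          (pvF orig (s : Int)) (out, seen)).2 ↔
        x ∈ ((PySem.List.pyRange ((s : Int) + j) ((s : Int) + j + d) 1).foldl
          (pvF orig (s : Int)) (out, seen)).1) := by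
  intro d
  induction d with
  | zero =>
      intro j out seen hinv
      rw [PySem.List.pyRange_one_eq_nil (by omega), PySem.List.pyRange_one_eq_nil (by omega)]
      exact ⟨rfl, hinv⟩
  | succ d ih =>
      intro j out seen hinv
      rw [PySem.List.pyRange_one_cons (a := (s : Int) + j) (by omega),
          PySem.List.pyRange_one_cons (a := (j : Int)) (by omega)]
      simp only [List.foldl_cons]
      have hseg : PySem.List.slice orig (some (s : Int)) (some ((s : Int) + j)) =
          (orig.drop s).take j := by
        simpa using PySem.List.slice_natCast_add (xs := orig) (j := s) (n := j)
      have hj : ((j : Int)).toNat = j := by omega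
      have hstep : pvF orig (s : Int) (out, seen) ((s : Int) + j) =
          (pvDedup (orig.drop s) out (j : Int),
           if (orig.drop s).take j ∈ seen then seen
           else PySem.Set.add seen ((orig.drop s).take j)) := by
        unfold pvF pvDedup
        rw [hseg, hj]
        by_cases hmem : (orig.drop s).take j ∈ out
        · rw [if_pos ((hinv _).mpr hmem), if_pos hmem, if_pos ((hinv _).mpr hmem)]
        · rw [if_neg (fun h => hmem ((hinv _).mp h)), if_neg hmem,
              if_neg (fun h => hmem ((hinv _).mp h))]
      rw [hstep]
      have hinv' : ∀ x, x ∈ (if (orig.drop s).take j ∈ seen then seen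
          else PySem.Set.add seen ((orig.drop s).take j)) ↔
          x ∈ pvDedup (orig.drop s) out (j : Int) := by
        intro x
        unfold pvDedup
        rw [hj]
        by_cases hmem : (orig.drop s).take j ∈ out
        · rw [if_pos ((hinv _).mpr hmem), if_pos hmem]; exact hinv x
        · rw [if_neg (fun h => hmem ((hinv _).mp h)), if_neg hmem, PySem.Set.mem_add]
          simp only [List.mem_append, List.mem_singleton]
          exact or_congr_left (hinv x)
      have this1 := ih (j + 1) (pvDedup (orig.drop s) out (j : Int))
        (if (orig.drop s).take j ∈ seen then seen
         else PySem.Set.add seen ((orig.drop s).take j)) hinv'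
      rw [pv_range_congr ((s : Int) + ↑(j + 1)) ((s : Int) + ↑(j + 1) + ↑d)
            ((s : Int) + ↑j + 1) ((s : Int) + ↑j + ↑(d + 1)) (by push_cast; ring)
            (by push_cast; ring),
          pv_range_congr ((↑(j + 1) : Int)) ((↑(j + 1) : Int) + ↑d)
            ((↑j : Int) + 1) ((↑j : Int) + ↑(d + 1)) (by push_cast; ring)
            (by push_cast; ring)] at this1
      exact this1

-- A's inner round = the clean dedup fold over all of range(0, L), then the unconditional
-- append of the whole (non-empty) suffix.
lemma pv_innerA_eq (suffix : List Int) (hne : suffix ≠ []) (out : List (List Int)) :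
    pvInnerA suffix (suffix.length : Int) out =
      (PySem.List.pyRange 0 (suffix.length : Int) 1).foldl (pvDedup suffix) out ++ [suffix] := by
  obtain ⟨L, hL⟩ : ∃ L : Nat, suffix.length = L + 1 := by
    cases suffix with
    | nil => exact absurd rfl hne
    | cons a t => exact ⟨t.length, rfl⟩
  have hsplit : PySem.List.pyRange 0 (suffix.length : Int) 1 =
      PySem.List.pyRange 0 (L : Int) 1 ++ [(L : Int)] := by
    rw [pv_range_congr 0 (suffix.length : Int) 0 ((L : Int) + 1) rfl (by rw [hL]; push_cast; ring)]
    exact PySem.List.pyRange_one_succ_right (by omega)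
  unfold pvInnerA
  rw [hsplit, List.foldl_append, List.foldl_append]
  simp only [List.foldl_cons, List.foldl_nil]
  have hcongr : (PySem.List.pyRange 0 (L : Int) 1).foldl (fun acc i =>
      let acc1 := if PySem.List.slice suffix (some 0) (some i) ∈ acc then acc
                  else acc ++ [PySem.List.slice suffix (some 0) (some i)]
      if i + 1 = (suffix.length : Int) then
        acc1 ++ [PySem.List.slice suffix (some 0) (some (i + 1))]
      else acc1) out
      = (PySem.List.pyRange 0 (L : Int) 1).foldl (pvDedup suffix) out := by
    apply PySem.List.foldl_congr_mem
    intro acc i hi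
    rw [PySem.List.mem_pyRange_one] at hi
    have hne' : ¬ (i + 1 = (suffix.length : Int)) := by omega
    have htake : PySem.List.slice suffix (some 0) (some i) = suffix.take i.toNat := by
      simp only [PySem.List.slice_zero_start]
      exact PySem.List.slice_to suffix hi.1
    simp only [hne', if_false, htake, pvDedup]
  rw [hcongr]
  have htakeL : PySem.List.slice suffix (some 0) (some (L : Int)) = suffix.take ((L : Int)).toNat := by
    simp only [PySem.List.slice_zero_start]
    exact PySem.List.slice_to suffix (by omega)
  have hlast : ((L : Int) + 1 = (suffix.length : Int)) := by omega
  have hfull : PySem.List.slice suffix (some 0) (some ((L : Int) + 1)) = suffix := by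
    simp only [PySem.List.slice_zero_start]
    rw [PySem.List.slice_to suffix (by omega : (0:Int) ≤ (L:Int) + 1)]
    have h1 : ((L : Int) + 1).toNat = suffix.length := by omega
    rw [h1, List.take_length]
  simp only [if_pos hlast, hfull, htakeL]
  rfl

-- the main loop correspondence: A's remaining rounds on the suffix orig.drop s equal
-- B's remaining outer iterations start = s .. n-1, given the seen/out invariant.
lemma pv_main (orig : List Int) :
    ∀ (d s : Nat), s + d = orig.length →
    ∀ (out : List (List Int)) (seen : PySem.Set (List Int)),
    (∀ x, x ∈ seen ↔ x ∈ out) →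
    pvLoopA out (orig.drop s) =
      ((PySem.List.pyRange (s : Int) (orig.length : Int) 1).foldl
        (pvStepB orig (orig.length : Int)) (out, seen)).1 := by
  intro d
  induction d with
  | zero =>
      intro s hs out seen hinv
      rw [List.drop_of_length_le (by omega), PySem.List.pyRange_one_eq_nil (by omega)]
      rfl
  | succ d ih =>
      intro s hs out seen hinv
      have hslt : s < orig.length := by omega
      have hdrop : orig.drop s = orig[s] :: orig.drop (s + 1) :=
        (List.getElem_cons_drop (h := hslt)).symm
      have hlen : (orig.drop s).length = orig.length - s := by simp
      have hne : orig.drop s ≠ [] := by rw [hdrop]; exact List.cons_ne_nil _ _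
      -- A side: one round, then the tail
      have hA1 : pvLoopA out (orig.drop s) =
          pvLoopA (pvInnerA (orig.drop s) (((orig.drop s).length : Nat) : Int) out)
            (orig.drop (s + 1)) := by
        rw [hdrop]; rfl
      -- B side: one outer step
      rw [hA1, PySem.List.pyRange_one_cons (by omega)]
      simp only [List.foldl_cons]
      -- B's step at start = s, written via pvF
      have hsuffix : PySem.List.slice orig (some (s : Int)) (some (orig.length : Int)) =
          orig.drop s := by
        rw [PySem.List.slice_natCast (a := s) (b := orig.length)]
        exact List.take_of_length_le (by simp)
      have hstepB : pvStepB orig (orig.length : Int) (out, seen) (s : Int) =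
          (((PySem.List.pyRange (s : Int) (orig.length : Int) 1).foldl
              (pvF orig (s : Int)) (out, seen)).1 ++ [orig.drop s],
           PySem.Set.add ((PySem.List.pyRange (s : Int) (orig.length : Int) 1).foldl
              (pvF orig (s : Int)) (out, seen)).2 (orig.drop s)) := by
        unfold pvStepB pvF
        rw [hsuffix]
      rw [hstepB]
      -- the shift lemma at j = 0, fuel = length - s
      have hshift := pv_dedup_shift orig s (d + 1) 0 out seen hinv
      have hc1 : ((s : Int) + ((0 : Nat) : Int)) = (s : Int) := by push_cast; ring
      have hc2 : ((s : Int) + ((0 : Nat) : Int) + ((d + 1 : Nat) : Int)) = (orig.length : Int) := by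
        push_cast; omega
      have hc3 : (((0 : Nat) : Int) + ((d + 1 : Nat) : Int)) = (((orig.drop s).length : Nat) : Int) := by
        rw [hlen]; push_cast; omega
      rw [pv_range_congr _ _ (s : Int) (orig.length : Int) hc1 hc2,
          pv_range_congr _ _ 0 (((orig.drop s).length : Nat) : Int) (by simp) hc3] at hshift
      set st2 := (PySem.List.pyRange (s : Int) (orig.length : Int) 1).foldl
        (pvF orig (s : Int)) (out, seen) with hst2
      have hAeq : pvInnerA (orig.drop s) (((orig.drop s).length : Nat) : Int) out =
          st2.1 ++ [orig.drop s] := by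
        rw [pv_innerA_eq (orig.drop s) hne out, ← hshift.1]
      have hinv' : ∀ x, x ∈ PySem.Set.add st2.2 (orig.drop s) ↔
          x ∈ st2.1 ++ [orig.drop s] := by
        intro x
        rw [PySem.Set.mem_add]
        simp only [List.mem_append, List.mem_singleton]
        exact or_congr_left (hshift.2 x)
      have hIH := ih (s + 1) (by omega) (st2.1 ++ [orig.drop s])
        (PySem.Set.add st2.2 (orig.drop s)) hinv'
      rw [pv_range_congr (((s + 1 : Nat) : Int)) (orig.length : Int)
            ((s : Int) + 1) (orig.length : Int) (by push_cast; ring) rfl] at hIH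
      rw [hAeq]
      exact hIH

-- ===== VERDICT (by name: the statement is the Claim_ definition above) =====
theorem make_sublist_spec : Claim_equal_make_sublist := by
  intro listi _
  unfold Spec_make_sublist make_sublist make_sublist_alt
  have h := pv_main listi listi.length 0 (by omega) [] PySem.Set.empty
    (by intro x; simp [PySem.Set.empty])
  simpa using h
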